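-- pv_equiv track=rewrite | github.com/leuchtum/cse-seminar-windprognose | prognose/korrelation.py | make_new_ticks
-- ===== SOURCE A (Python) =====
-- def make_new_ticks(ticks):
--     return_ticks = []
--     for tick in ticks:
--         if "RH_" in tick:
--             return_ticks.append("$RH$")
--         elif "SD_" in tick:
--             return_ticks.append("$SD$")
--         elif "T_" in tick:
--             return_ticks.append("$T$")
--         elif "WD_" in tick:
--             return_ticks.append("$\\varphi$")
--         elif "WS_" in tick:
--             return_ticks.append("$v$")
--         elif "_SEAS" in tick:
--             return_ticks.append("$cal_{seas}$")
--         elif "_HOUR" in tick: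
--             return_ticks.append("$cal_{day}$")
--         elif "P_" in tick:
--             return_ticks.append("$p$")
--         else:
--             raise ValueError(f"Key {tick} unknown")
--     return return_ticks
-- ===== SOURCE B (Python) =====
-- _LABELS = [
--     ("RH_", "$RH$"),
--     ("SD_", "$SD$"),
--     ("T_", "$T$"),
--     ("WD_", "$\\varphi$"),
--     ("WS_", "$v$"),
--     ("_SEAS", "$cal_{seas}$"),
--     ("_HOUR", "$cal_{day}$"),
--     ("P_", "$p$"),
-- ]
--
--
-- def make_new_ticks(ticks):
--     # Swapped loop nesting: one pass over all ticks per key (in precedence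
--     # order), filling a parallel labels array only where still unassigned.
--     labels = [None] * len(ticks)
--     for sub, label in _LABELS:
--         for i, tick in enumerate(ticks):
--             if labels[i] is None and sub in tick:
--                 labels[i] = label
--     for tick, label in zip(ticks, labels):
--         if label is None:
--             raise ValueError(f"Key {tick} unknown")
--     return labels
-- ===== Notes on version B (the rewrite author's own statement) =====
-- stated objective: alternative
-- what changed: Loop nesting is swapped: instead of testing all eight keys per tick, B makes one pass over all ticks per key in precedence order, filling a parallel labels array only where still unassigned, then a final pass raises on any unfilled slot.
import Mathlib
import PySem

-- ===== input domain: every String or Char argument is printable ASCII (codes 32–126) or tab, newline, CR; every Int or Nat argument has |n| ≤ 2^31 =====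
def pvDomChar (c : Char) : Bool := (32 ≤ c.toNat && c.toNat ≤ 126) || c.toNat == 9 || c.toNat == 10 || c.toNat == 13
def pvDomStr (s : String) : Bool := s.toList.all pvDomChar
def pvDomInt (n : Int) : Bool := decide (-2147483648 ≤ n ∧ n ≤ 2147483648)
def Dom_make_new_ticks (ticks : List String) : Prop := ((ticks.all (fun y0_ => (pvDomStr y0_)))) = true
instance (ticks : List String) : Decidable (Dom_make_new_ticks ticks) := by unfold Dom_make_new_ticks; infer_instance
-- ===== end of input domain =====

-- B swaps the loop nesting: one pass over all ticks per key (in precedence order), filling a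
-- parallel labels array only where still unassigned (objective: alternative). On ticks matching
-- no key both Pythons raise ValueError; Pre_ excludes exactly those inputs.

-- ===== PORT A =====
def make_new_ticks (ticks : List String) : List String :=
  match ticks with
  | [] => []
  | tick :: rest =>
    (if PySem.Str.isIn "RH_" tick then "$RH$"
     else if PySem.Str.isIn "SD_" tick then "$SD$"
     else if PySem.Str.isIn "T_" tick then "$T$"
     else if PySem.Str.isIn "WD_" tick then "$\\varphi$"
     else if PySem.Str.isIn "WS_" tick then "$v$"
     else if PySem.Str.isIn "_SEAS" tick then "$cal_{seas}$"
     else if PySem.Str.isIn "_HOUR" tick then "$cal_{day}$"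
     else if PySem.Str.isIn "P_" tick then "$p$"
     else "") :: make_new_ticks rest   -- the else branch raises in Python; excluded by Pre_

-- ===== PORT B =====
def mntLabels : List (String × String) :=
  [("RH_", "$RH$"), ("SD_", "$SD$"), ("T_", "$T$"), ("WD_", "$\\varphi$"),
   ("WS_", "$v$"), ("_SEAS", "$cal_{seas}$"), ("_HOUR", "$cal_{day}$"), ("P_", "$p$")]

-- inner loop of B: 'for i, tick in enumerate(ticks): if labels[i] is None and sub in tick: labels[i] = label'
def mntPass (sub label : String) (ticks : List String) (labels : List (Option String)) :
    List (Option String) :=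
  List.zipWith (fun tick o => if o.isNone && PySem.Str.isIn sub tick then some label else o)
    ticks labels

def make_new_ticks_alt (ticks : List String) : List String :=
  let labels := mntLabels.foldl (fun ls p => mntPass p.1 p.2 ticks ls)
                  (ticks.map (fun _ => (none : Option String)))
  -- final pass: a None slot raises in Python; excluded by Pre_
  (ticks.zip labels).map (fun p => p.2.getD "")

-- ===== PRECONDITION & SPEC =====
-- Pre_: every tick contains one of the eight known keys; on any other tick both Pythons raise ValueError.
def Pre_make_new_ticks (ticks : List String) : Prop :=
  (ticks.all (fun t => mntLabels.any (fun p => PySem.Str.isIn p.1 t))) = true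
instance (ticks : List String) : Decidable (Pre_make_new_ticks ticks) := by
  unfold Pre_make_new_ticks; infer_instance
def pvWitness_make_new_ticks : List String := ["RH_01", "x_SEAS", "P_a"]
def Spec_make_new_ticks (ticks : List String) (out : List String) : Prop := out = make_new_ticks_alt ticks
instance (ticks : List String) (out : List String) : Decidable (Spec_make_new_ticks ticks out) := by unfold Spec_make_new_ticks; infer_instance

-- ===== CLAIM (what is proved, stated in full; the proofs are below) =====
def Claim_equal_make_new_ticks : Prop := ∀ (ticks : List String), Dom_make_new_ticks ticks → Pre_make_new_ticks ticks → Spec_make_new_ticks ticks (make_new_ticks ticks)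

-- ===== LEMMAS AND PROOFS =====

-- one pass acts pointwise on a mapped labels list
theorem mntPass_map (sub label : String) (ticks : List String) (k : String → Option String) :
    mntPass sub label ticks (ticks.map k) =
      ticks.map (fun t => if (k t).isNone && PySem.Str.isIn sub t then some label else k t) := by
  induction ticks with
  | nil => rfl
  | cons t rest ih => simp [mntPass] at *; exact ih

-- the whole fold over the table acts pointwise
theorem mntFold_map (table : List (String × String)) (ticks : List String)
    (k : String → Option String) :
    table.foldl (fun ls p => mntPass p.1 p.2 ticks ls) (ticks.map k) =
      ticks.map (fun t =>
        table.foldl (fun o p => if o.isNone && PySem.Str.isIn p.1 t then some p.2 else o) (k t)) := by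
  induction table generalizing k with
  | nil => rfl
  | cons p rest ih =>
    simp only [List.foldl_cons, mntPass_map]
    exact ih _

-- zip-then-project is a map
theorem zip_map_getD (ticks : List String) (f : String → Option String) :
    ((ticks.zip (ticks.map f)).map (fun p => p.2.getD "")) =
      ticks.map (fun t => (f t).getD "") := by
  induction ticks with
  | nil => rfl
  | cons t rest ih => simp [ih]

-- once a slot is assigned, later passes leave it alone
theorem mntFoldStep_some (table : List (String × String)) (t x : String) :
    table.foldl (fun o p => if o.isNone && PySem.Str.isIn p.1 t then some p.2 else o)
      (some x) = some x := by
  induction table with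
  | nil => rfl
  | cons p rest ih => simpa using ih

-- per-tick: the fold in precedence order is a first-match lookup
theorem mntFold_none (table : List (String × String)) (t : String) :
    table.foldl (fun o p => if o.isNone && PySem.Str.isIn p.1 t then some p.2 else o)
      (none : Option String) =
      (table.find? (fun p => PySem.Str.isIn p.1 t)).map Prod.snd := by
  induction table with
  | nil => rfl
  | cons p rest ih =>
    rw [List.foldl_cons]
    by_cases h : PySem.Str.isIn p.1 t
    · rw [if_pos (by simpa using h), List.find?_cons, h]
      exact mntFoldStep_some rest t p.2
    · rw [if_neg (by simpa using h), List.find?_cons, Bool.of_not_eq_true h]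
      exact ih

-- per-tick: the first-match lookup over the concrete table equals A's cascade
theorem mnt_elem (t : String) :
    (mntLabels.foldl (fun o p => if o.isNone && PySem.Str.isIn p.1 t then some p.2 else o)
      (none : Option String)).getD "" =
      (if PySem.Str.isIn "RH_" t then "$RH$"
       else if PySem.Str.isIn "SD_" t then "$SD$"
       else if PySem.Str.isIn "T_" t then "$T$"
       else if PySem.Str.isIn "WD_" t then "$\\varphi$"
       else if PySem.Str.isIn "WS_" t then "$v$"
       else if PySem.Str.isIn "_SEAS" t then "$cal_{seas}$"
       else if PySem.Str.isIn "_HOUR" t then "$cal_{day}$"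
       else if PySem.Str.isIn "P_" t then "$p$"
       else "") := by
  rw [mntFold_none, mntLabels]
  by_cases h1 : PySem.Str.isIn "RH_" t
  · rw [List.find?_cons_of_pos (by simpa using h1)]; simp_all [PySem.Str.isIn]
  rw [List.find?_cons_of_neg (by simpa using h1)]
  by_cases h2 : PySem.Str.isIn "SD_" t
  · rw [List.find?_cons_of_pos (by simpa using h2)]; simp_all [PySem.Str.isIn]
  rw [List.find?_cons_of_neg (by simpa using h2)]
  by_cases h3 : PySem.Str.isIn "T_" t
  · rw [List.find?_cons_of_pos (by simpa using h3)]; simp_all [PySem.Str.isIn]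
  rw [List.find?_cons_of_neg (by simpa using h3)]
  by_cases h4 : PySem.Str.isIn "WD_" t
  · rw [List.find?_cons_of_pos (by simpa using h4)]; simp_all [PySem.Str.isIn]
  rw [List.find?_cons_of_neg (by simpa using h4)]
  by_cases h5 : PySem.Str.isIn "WS_" t
  · rw [List.find?_cons_of_pos (by simpa using h5)]; simp_all [PySem.Str.isIn]
  rw [List.find?_cons_of_neg (by simpa using h5)]
  by_cases h6 : PySem.Str.isIn "_SEAS" t
  · rw [List.find?_cons_of_pos (by simpa using h6)]; simp_all [PySem.Str.isIn]
  rw [List.find?_cons_of_neg (by simpa using h6)]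
  by_cases h7 : PySem.Str.isIn "_HOUR" t
  · rw [List.find?_cons_of_pos (by simpa using h7)]; simp_all [PySem.Str.isIn]
  rw [List.find?_cons_of_neg (by simpa using h7)]
  by_cases h8 : PySem.Str.isIn "P_" t
  · rw [List.find?_cons_of_pos (by simpa using h8)]; simp_all [PySem.Str.isIn]
  rw [List.find?_cons_of_neg (by simpa using h8)]
  simp_all [PySem.Str.isIn]

theorem alt_eq_map (ticks : List String) :
    make_new_ticks_alt ticks =
      ticks.map (fun t =>
        (if PySem.Str.isIn "RH_" t then "$RH$"
         else if PySem.Str.isIn "SD_" t then "$SD$"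
         else if PySem.Str.isIn "T_" t then "$T$"
         else if PySem.Str.isIn "WD_" t then "$\\varphi$"
         else if PySem.Str.isIn "WS_" t then "$v$"
         else if PySem.Str.isIn "_SEAS" t then "$cal_{seas}$"
         else if PySem.Str.isIn "_HOUR" t then "$cal_{day}$"
         else if PySem.Str.isIn "P_" t then "$p$"
         else "")) := by
  unfold make_new_ticks_alt
  rw [mntFold_map, zip_map_getD]
  exact List.map_congr_left (fun t _ => mnt_elem t)

-- ===== VERDICT (by name: the statement is the Claim_ definition above) =====
theorem make_new_ticks_spec : Claim_equal_make_new_ticks := by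
  intro ticks hdom hpre
  unfold Spec_make_new_ticks
  rw [alt_eq_map]
  clear hdom hpre
  induction ticks with
  | nil => rfl
  | cons t rest ih => simp only [make_new_ticks, List.map_cons, ih]
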